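-- pv_equiv track=rewrite | github.com/yungommi/algorithm | programmers/level0/20230904/수 조작하기 1.py | solution
-- ===== SOURCE A (Python) =====
-- def solution(n, control):
--     alp_num = {
--         "w" : 1,
--         "s" : -1,
--         "d" : 10,
--         "a" : -10
--               }
--
--     for alp in control:
--         n += alp_num[alp]
--     return n
-- ===== SOURCE B (Python) =====
-- def solution(n, control):
--     alp_num = {
--         "w" : 1,
--         "s" : -1,
--         "d" : 10,
--         "a" : -10
--               }
--     counts = {}
--     for c in control:
--         counts[c] = counts.get(c, 0) + 1
--     return n + sum(alp_num[c] * k for c, k in counts.items())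
-- ===== Notes on version B (the rewrite author's own statement) =====
-- stated objective: alternative
-- what changed: Instead of adding a delta per character, B first builds a frequency table of the control string and then returns n plus a weighted sum over the distinct characters (weight * count).
import Mathlib
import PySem

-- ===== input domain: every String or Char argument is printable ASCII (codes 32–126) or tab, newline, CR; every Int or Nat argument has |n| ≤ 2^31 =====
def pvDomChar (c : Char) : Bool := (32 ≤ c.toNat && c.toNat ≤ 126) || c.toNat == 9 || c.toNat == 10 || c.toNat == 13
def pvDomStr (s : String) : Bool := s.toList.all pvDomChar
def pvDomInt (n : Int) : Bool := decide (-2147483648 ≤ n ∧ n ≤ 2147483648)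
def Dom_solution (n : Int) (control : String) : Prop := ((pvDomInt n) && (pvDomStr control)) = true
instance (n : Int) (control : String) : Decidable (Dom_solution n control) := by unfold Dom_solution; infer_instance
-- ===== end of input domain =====

-- B builds a frequency table of the control string first and returns n plus a
-- weighted sum over the distinct characters, instead of A's per-character accumulation (objective: alternative).

-- ===== PORT A =====
-- the literal dict alp_num
def alpNumDict : PySem.Dict Char Int :=
  PySem.Dict.ofList [('w', 1), ('s', -1), ('d', 10), ('a', -10)]

def solution (n : Int) (control : String) : Int :=
  -- for alp in control: n += alp_num[alp]   (get? = none is KeyError, excluded by Pre_)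
  control.toList.foldl (fun acc c => acc + (alpNumDict.get? c).getD 0) n

-- ===== PORT B =====
def solution_alt (n : Int) (control : String) : Int :=
  -- counts = {}; for c in control: counts[c] = counts.get(c, 0) + 1
  let counts := control.toList.foldl (fun d c => d.insert c (d.getD c 0 + 1)) PySem.Dict.empty
  -- n + sum(alp_num[c] * k for c, k in counts.items())   (get? = none is KeyError, excluded by Pre_)
  n + (counts.items.map (fun p => (alpNumDict.get? p.1).getD 0 * p.2)).sum

-- ===== PRECONDITION & SPEC =====
-- Pre_ excludes exactly the inputs where Python's A raises KeyError: a control character outside {w,s,d,a}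
def Pre_solution (n : Int) (control : String) : Prop :=
  control.toList.all (fun c => c ∈ (['w', 's', 'd', 'a'] : List Char)) = true
instance (n : Int) (control : String) : Decidable (Pre_solution n control) := by
  unfold Pre_solution; infer_instance

def pvWitness_solution : Int × String := (4, "ws")

def Spec_solution (n : Int) (control : String) (out : Int) : Prop := out = solution_alt n control
instance (n : Int) (control : String) (out : Int) : Decidable (Spec_solution n control out) := by unfold Spec_solution; infer_instance

-- ===== CLAIM (what is proved, stated in full; the proofs are below) =====
def Claim_equal_solution : Prop := ∀ (n : Int) (control : String), Dom_solution n control → Pre_solution n control → Spec_solution n control (solution n control)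

-- ===== LEMMAS AND PROOFS =====

-- weight of one character, as both ports compute it
def pvW (c : Char) : Int := (alpNumDict.get? c).getD 0

-- A's loop is n plus the plain sum of weights
theorem solutionA_eq_sum (n : Int) (cs : List Char) :
    cs.foldl (fun acc c => acc + pvW c) n = n + (cs.map pvW).sum := by
  induction cs generalizing n with
  | nil => simp
  | cons c t ih => simp [List.foldl_cons, ih (n + pvW c)]; ring

-- summing w k * [k = c] over a nodup list containing c picks out w c
theorem sum_ite_single (w : Char → Int) (S : List Char) (c : Char)
    (hn : S.Nodup) (hc : c ∈ S) :
    (S.map (fun k => w k * (if c = k then (1 : Int) else 0))).sum = w c := by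
  induction S with
  | nil => simp at hc
  | cons s t ih =>
    have hn' := List.nodup_cons.mp hn
    rcases List.mem_cons.mp hc with rfl | h
    · have hz : ∀ x ∈ t.map (fun k => w k * (if c = k then (1 : Int) else 0)), x = 0 := by
        intro x hx
        rcases List.mem_map.mp hx with ⟨k, hk, rfl⟩
        have hck : c ≠ k := fun he => hn'.1 (he ▸ hk)
        simp [hck]
      rw [List.map_cons, List.sum_cons, List.sum_eq_zero hz]
      simp
    · have hne : c ≠ s := fun he => hn'.1 (he ▸ h)
      simp only [List.map_cons, List.sum_cons, if_neg hne, mul_zero, zero_add]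
      exact ih hn'.2 h

-- the count-then-combine sum over any nodup superset of the characters equals the plain sum
theorem sum_weighted_counts (w : Char → Int) (cs S : List Char)
    (hn : S.Nodup) (hsub : ∀ c ∈ cs, c ∈ S) :
    (S.map (fun k => w k * (cs.count k : Int))).sum = (cs.map w).sum := by
  induction cs with
  | nil => simp
  | cons c t ih =>
    have hsum : (S.map (fun k => w k * ((c :: t).count k : Int))).sum
        = (S.map (fun k => w k * (t.count k : Int))).sum
          + (S.map (fun k => w k * (if c = k then (1 : Int) else 0))).sum := by
      rw [← List.sum_map_add]
      refine congrArg List.sum (List.map_congr_left fun k _ => ?_)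
      by_cases h : c = k
      · simp [h]; ring
      · simp [h]
    rw [hsum, ih (fun x hx => hsub x (List.mem_cons_of_mem c hx)),
        sum_ite_single w S c hn (hsub c (List.mem_cons_self))]
    simp [add_comm]

-- ===== VERDICT (by name: the statement is the Claim_ definition above) =====
theorem solution_spec : Claim_equal_solution := by
  intro n control _ _
  show control.toList.foldl (fun acc c => acc + pvW c) n
      = n + ((control.toList.foldl (fun d c => d.insert c (d.getD c 0 + 1))
          PySem.Dict.empty).items.map (fun p => pvW p.1 * p.2)).sum
  rw [PySem.Dict.foldl_insert_getD_add_one_eq_counter, PySem.Dict.items_counter,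
      List.map_map, solutionA_eq_sum]
  congr 1
  rw [← sum_weighted_counts pvW control.toList (PySem.Set.ofList control.toList)
        (PySem.Set.nodup_ofList _) (fun c hc => (PySem.Set.mem_ofList _ _).mpr hc)]
  rfl
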